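-- pv_equiv track=rewrite | github.com/RoshniAnna/NeuRIPS_Data_DN_Detection | Experiments/data_loader.py | generate_multilabels
-- ===== SOURCE A (Python) =====
-- def generate_multilabels(targeted_stations_list):
--     """
--     Converts a list of lists of targeted stations into multi-label binary vectors.
--
--     Args:
--         targeted_stations_list (List[List[str]]): A list where each element is a list of station names (e.g., ["PV1", "PV2"]).
--
--     Returns:
--         class_labels (List[List[int]]): A list of binary vectors indicating presence of each station.
--         all_stations (List[str]): Sorted list of all unique stations (used as label indices).
--     """
--     # Step 1: Get all unique stations
--     all_stations = sorted(set(station for stations in targeted_stations_list for station in stations))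
--
--     # Step 2: Create a mapping from station name to index
--     station_to_index = {station: idx for idx, station in enumerate(all_stations)}
--
--     # Step 3: Generate binary label vectors
--     class_labels = []
--     for stations in targeted_stations_list:
--         label_vector = [0] * len(all_stations)
--         for station in stations:
--             label_vector[station_to_index[station]] = 1
--         class_labels.append(label_vector)
--
--     return class_labels, all_stations
-- ===== SOURCE B (Python) =====
-- def generate_multilabels(targeted_stations_list):
--     """Same result as A, without the station_to_index dict: each label vector is
--     built by scanning all_stations and testing membership in the row's set."""
--     all_stations = sorted({s for row in targeted_stations_list for s in row})
--     class_labels = [[1 if s in present else 0 for s in all_stations]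
--                     for present in map(set, targeted_stations_list)]
--     return class_labels, all_stations
-- ===== Notes on version B (the rewrite author's own statement) =====
-- stated objective: simpler
-- what changed: Drops the station-to-index dict and the index-assignment inner loop: each binary vector is produced by mapping over the sorted station list and testing membership of each station in the row's set, instead of allocating a zero vector and setting positions via dict lookups.
import Mathlib
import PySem

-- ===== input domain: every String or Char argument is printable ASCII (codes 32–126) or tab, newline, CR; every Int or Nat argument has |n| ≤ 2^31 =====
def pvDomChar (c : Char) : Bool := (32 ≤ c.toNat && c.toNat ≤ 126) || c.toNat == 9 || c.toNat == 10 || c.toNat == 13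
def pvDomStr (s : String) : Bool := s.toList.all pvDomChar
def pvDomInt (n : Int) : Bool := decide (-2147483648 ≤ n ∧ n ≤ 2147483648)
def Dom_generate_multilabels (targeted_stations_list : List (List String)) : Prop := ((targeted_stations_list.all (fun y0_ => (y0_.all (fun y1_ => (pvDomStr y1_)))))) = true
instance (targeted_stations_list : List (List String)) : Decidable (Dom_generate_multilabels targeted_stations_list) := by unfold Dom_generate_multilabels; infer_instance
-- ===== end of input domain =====

-- B drops A's station→index dict and index assignment; each vector is all_stations
-- mapped through a membership test against the row's set (simpler; same cost).

-- ===== PORT A =====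
def generate_multilabels (targeted_stations_list : List (List String)) : List (List Int) × List String :=
  let all_stations := PySem.List.sorted (PySem.Set.ofList (targeted_stations_list.flatMap (fun stations => stations))) (fun x => x) false
  let station_to_index : PySem.Dict String Int :=
    (PySem.List.enumerate all_stations).foldl (fun d p => d.insert p.2 p.1) PySem.Dict.empty
  let class_labels := targeted_stations_list.foldl (fun acc stations =>
    let label_vector : List Int := List.replicate all_stations.length 0
    let label_vector := stations.foldl (fun v station =>
      match station_to_index.get? station with
      | some i => PySem.List.pySetD v i 1    -- KeyError unreachable: every station is a key
      | none => v) label_vector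
    acc ++ [label_vector]) []
  (class_labels, all_stations)

-- ===== PORT B =====
def generate_multilabels_alt (targeted_stations_list : List (List String)) : List (List Int) × List String :=
  let all_stations := PySem.List.sorted (PySem.Set.ofList (targeted_stations_list.flatMap (fun row => row))) (fun x => x) false
  let class_labels := targeted_stations_list.map (fun row =>
    let present := PySem.Set.ofList row
    all_stations.map (fun s => if PySem.Set.contains present s then (1 : Int) else 0))
  (class_labels, all_stations)

-- ===== PRECONDITION & SPEC =====
def Spec_generate_multilabels (targeted_stations_list : List (List String)) (out : List (List Int) × List String) : Prop := out = generate_multilabels_alt targeted_stations_list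
instance (targeted_stations_list : List (List String)) (out : List (List Int) × List String) : Decidable (Spec_generate_multilabels targeted_stations_list out) := by unfold Spec_generate_multilabels; infer_instance

-- ===== CLAIM (what is proved, stated in full; the proofs are below) =====
def Claim_equal_generate_multilabels : Prop := ∀ (targeted_stations_list : List (List String)), Dom_generate_multilabels targeted_stations_list → Spec_generate_multilabels targeted_stations_list (generate_multilabels targeted_stations_list)

-- ===== LEMMAS AND PROOFS =====

-- The dict built by folding insert over enumerate l maps a key to start + (first index of key in l), for l without duplicates.
theorem pv_get?_enum_fold (l : List String) (s0 : Int) (d0 : PySem.Dict String Int)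
    (hl : l.Nodup) (k : String) :
    ((PySem.List.enumerate l s0).foldl (fun d p => d.insert p.2 p.1) d0).get? k =
      match PySem.List.index? l k with
      | some i => some (s0 + i)
      | none => d0.get? k := by
  induction l generalizing s0 d0 with
  | nil => simp [PySem.List.enumerate_nil, PySem.List.index?]
  | cons x xs ih =>
    rw [PySem.List.enumerate_cons]
    simp only [List.foldl_cons]
    rw [ih (s0 + 1) (d0.insert x s0) (List.Nodup.of_cons hl)]
    by_cases hk : k = x
    · subst hk
      have hnx : k ∉ xs := (List.nodup_cons.mp hl).1
      rw [PySem.List.index?_cons_self, Iff.mpr (PySem.List.index?_eq_none_iff xs k) hnx]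
      simp [PySem.Dict.get?_insert_self]
    · have hx : x ≠ k := fun h => hk h.symm
      rw [PySem.List.index?_cons_of_ne xs hx]
      cases h : PySem.List.index? xs k with
      | none => simp [PySem.Dict.get?_insert_of_ne _ _ hk]
      | some i =>
        simp only [Option.map_some]
        push_cast
        congr 1
        ring

-- Characterisation of A's inner loop: entry j becomes 1 iff A[j] occurs in the row.
theorem pv_row_char (A : List String) (hA : A.Nodup)
    (stations : List String) (hsub : ∀ s ∈ stations, s ∈ A)
    (vec : List Int) (hlen : vec.length = A.length) :
    (stations.foldl (fun v station =>
      match ((PySem.List.enumerate A (0 : Int)).foldl (fun d p => d.insert p.2 p.1) PySem.Dict.empty).get? station with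
      | some i => PySem.List.pySetD v i 1
      | none => v) vec).length = A.length ∧
    ∀ j (hj : j < A.length),
      (stations.foldl (fun v station =>
        match ((PySem.List.enumerate A (0 : Int)).foldl (fun d p => d.insert p.2 p.1) PySem.Dict.empty).get? station with
        | some i => PySem.List.pySetD v i 1
        | none => v) vec).getD j 0 = if A[j] ∈ stations then 1 else vec.getD j 0 := by
  induction stations generalizing vec with
  | nil => exact ⟨hlen, fun j hj => by simp⟩
  | cons s rest ih =>
    simp only [List.foldl_cons]
    have hsA : s ∈ A := hsub s (List.mem_cons_self)
    obtain ⟨i, hi⟩ := Option.isSome_iff_exists.mp (Iff.mpr (PySem.List.index?_isSome_iff A s) hsA)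
    obtain ⟨hik, hAi, hfirst⟩ := PySem.List.getElem_of_index?_eq_some hi
    rw [pv_get?_enum_fold A 0 PySem.Dict.empty hA s, hi]
    simp only [zero_add]
    have hset : PySem.List.pySetD vec (i : Int) 1 = vec.set i 1 := PySem.List.pySetD_natCast ..
    rw [hset]
    have hlen' : (vec.set i 1).length = A.length := by simp [hlen]
    obtain ⟨hL, hE⟩ := ih (fun t ht => hsub t (List.mem_cons_of_mem _ ht)) (vec.set i 1) hlen'
    refine ⟨hL, fun j hj => ?_⟩
    rw [hE j hj]
    have hji : A[j] = s ↔ j = i := by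
      constructor
      · intro h
        exact (List.Nodup.getElem_inj_iff hA).mp (by rw [h, hAi])
      · intro h; subst h; exact hAi
    by_cases hm : A[j] ∈ rest
    · simp [hm, List.mem_cons]
    · simp only [hm, if_false, List.mem_cons, or_false]
      by_cases he : A[j] = s
      · have hji' : j = i := hji.mp he
        subst hji'
        simp [he, List.getD_eq_getElem?_getD, hlen ▸ hj]
      · have hne : j ≠ i := fun h => he (hji.mpr h)
        simp [he, List.getD_eq_getElem?_getD, List.getElem?_set_ne (fun h => hne h.symm)]

-- ===== VERDICT (by name: the statement is the Claim_ definition above) =====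
theorem generate_multilabels_spec : Claim_equal_generate_multilabels := by
  intro tsl _
  unfold Spec_generate_multilabels generate_multilabels generate_multilabels_alt
  simp only []
  set A := PySem.List.sorted (PySem.Set.ofList (tsl.flatMap (fun stations => stations))) (fun x => x) false with hAdef
  have hA : A.Nodup := by
    have hperm := PySem.List.sorted_perm (PySem.Set.ofList (tsl.flatMap (fun stations => stations))) (fun x => x) false
    exact hperm.nodup_iff.mpr (PySem.Set.nodup_ofList _)
  refine Prod.ext ?_ rfl
  rw [PySem.List.foldl_append_singleton_eq_map]
  apply List.map_congr_left
  intro row hrow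
  have hsub : ∀ s ∈ row, s ∈ A := by
    intro s hs
    rw [hAdef, PySem.List.mem_sorted, PySem.Set.mem_ofList]
    exact List.mem_flatMap.mpr ⟨row, hrow, hs⟩
  obtain ⟨hL, hE⟩ := pv_row_char A hA row hsub (List.replicate A.length 0) (by simp)
  apply List.ext_getElem
  · simpa using hL
  · intro j hj hj2
    have hjA : j < A.length := by simpa using hj2
    have h1 := hE j hjA
    have hgd : ∀ (l : List Int) (h : j < l.length), l[j] = l.getD j 0 := by
      intro l h; simp [List.getD_eq_getElem?_getD, List.getElem?_eq_getElem h]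
    rw [hgd _ hj, h1]
    by_cases hm : A[j] ∈ row <;>
      simp [hm, List.getElem_map, PySem.Set.mem_ofList]
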